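-- pv_equiv track=rewrite | github.com/xlr8shentmx/work_collab | transform_to_snowflake.py | split_large_code_cell
-- ===== SOURCE A (Python) =====
-- def split_large_code_cell(source_lines):
--     """
--     Split the large code cell into logical sections based on function definitions
--     Returns a list of (description, code_lines) tuples
--     """
--     sections = []
--     current_section = []
--     current_desc = "Imports and Setup"
--
--     i = 0
--     while i < len(source_lines):
--         line = source_lines[i]
--
--         # Check for major section boundaries
--         if 'def get_snowflake_session' in line:
--             if current_section:
--                 sections.append((current_desc, current_section))
--             current_section = [line]
--             current_desc = "Connection Management Functions"
--         elif 'def calculate_birth_window' in line: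
--             if current_section:
--                 sections.append((current_desc, current_section))
--             current_section = [line]
--             current_desc = "Date Window Calculation"
--         elif 'def process_membership' in line:
--             if current_section:
--                 sections.append((current_desc, current_section))
--             current_section = [line]
--             current_desc = "Membership Processing Functions"
--         elif 'def fetch_newborn_keys' in line:
--             if current_section:
--                 sections.append((current_desc, current_section))
--             current_section = [line]
--             current_desc = "Newborn Identification Functions"
--         elif 'def assign_claim_type' in line:
--             if current_section:
--                 sections.append((current_desc, current_section))
--             current_section = [line]
--             current_desc = "Claim Classification and Reference Tagging"
--         elif 'def build_hosp_rollup' in line: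
--             if current_section:
--                 sections.append((current_desc, current_section))
--             current_section = [line]
--             current_desc = "Hospital Rollup and Episode Building"
--         elif 'def build_nicu_rollup' in line:
--             if current_section:
--                 sections.append((current_desc, current_section))
--             current_section = [line]
--             current_desc = "NICU Analysis and Rollup"
--         elif 'def prepare_final_export' in line:
--             if current_section:
--                 sections.append((current_desc, current_section))
--             current_section = [line]
--             current_desc = "Final Export Preparation"
--         elif 'def main(' in line:
--             if current_section:
--                 sections.append((current_desc, current_section))
--             current_section = [line]
--             current_desc = "Main Pipeline Orchestration"
--         else:
--             current_section.append(line)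
--
--         i += 1
--
--     # Add the last section
--     if current_section:
--         sections.append((current_desc, current_section))
--
--     return sections
-- ===== SOURCE B (Python) =====
-- MARKERS = [
--     ('def get_snowflake_session', "Connection Management Functions"),
--     ('def calculate_birth_window', "Date Window Calculation"),
--     ('def process_membership', "Membership Processing Functions"),
--     ('def fetch_newborn_keys', "Newborn Identification Functions"),
--     ('def assign_claim_type', "Claim Classification and Reference Tagging"),
--     ('def build_hosp_rollup', "Hospital Rollup and Episode Building"),
--     ('def build_nicu_rollup', "NICU Analysis and Rollup"),
--     ('def prepare_final_export', "Final Export Preparation"),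
--     ('def main(', "Main Pipeline Orchestration"),
-- ]
--
-- def _marker_desc(line):
--     for m, d in MARKERS:
--         if m in line:
--             return d
--     return None
--
-- def split_large_code_cell(source_lines):
--     # Back-to-front scan: walking from the last line, collect lines into a
--     # buffer; a marker line closes the section it starts. Leftover buffer is
--     # the leading "Imports and Setup" section. Reverse at the end.
--     sections_rev = []
--     buf_rev = []
--     for line in reversed(source_lines):
--         d = _marker_desc(line)
--         if d is None:
--             buf_rev.append(line)
--         else:
--             sections_rev.append((d, [line] + buf_rev[::-1]))
--             buf_rev = []
--     if buf_rev:
--         sections_rev.append(("Imports and Setup", buf_rev[::-1]))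
--     return sections_rev[::-1]
-- ===== Notes on version B (the rewrite author's own statement) =====
-- stated objective: alternative
-- what changed: B scans the lines back-to-front with a buffer, closing each section at its marker line and emitting the leftover buffer as the leading 'Imports and Setup' section, then reverses; A scans front-to-back with a nine-branch elif ladder flushing the current section at each marker.
import Mathlib
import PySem

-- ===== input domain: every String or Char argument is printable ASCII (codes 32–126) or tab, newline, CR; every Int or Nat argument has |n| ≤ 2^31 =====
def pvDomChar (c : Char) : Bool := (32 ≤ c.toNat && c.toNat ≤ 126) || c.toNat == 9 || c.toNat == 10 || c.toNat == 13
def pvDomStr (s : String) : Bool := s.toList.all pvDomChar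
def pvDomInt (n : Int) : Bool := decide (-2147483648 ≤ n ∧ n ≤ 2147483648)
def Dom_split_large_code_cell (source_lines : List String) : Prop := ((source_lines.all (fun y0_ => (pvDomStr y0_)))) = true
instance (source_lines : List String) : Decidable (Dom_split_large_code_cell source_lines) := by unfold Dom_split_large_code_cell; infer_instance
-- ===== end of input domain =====

-- B scans the lines BACK-TO-FRONT, closing a section at each marker line and emitting the leftover
-- buffer as the leading "Imports and Setup" section, then reverses; A scans front-to-back with an
-- elif ladder flushing the current section at each marker. Return-value equivalence only.

-- ===== PORT A =====
-- state = (sections, current_section, current_desc); one step of A's while-loop body (branch ladder, in order)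
def pvStepA (acc : List (String × List String) × List String × String) (line : String) :
    List (String × List String) × List String × String :=
  let (sections, current_section, current_desc) := acc
  if PySem.Str.isIn "def get_snowflake_session" line then
    ((if current_section.isEmpty then sections else sections ++ [(current_desc, current_section)]),
      [line], "Connection Management Functions")
  else if PySem.Str.isIn "def calculate_birth_window" line then
    ((if current_section.isEmpty then sections else sections ++ [(current_desc, current_section)]),
      [line], "Date Window Calculation")
  else if PySem.Str.isIn "def process_membership" line then
    ((if current_section.isEmpty then sections else sections ++ [(current_desc, current_section)]),
      [line], "Membership Processing Functions")
  else if PySem.Str.isIn "def fetch_newborn_keys" line then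
    ((if current_section.isEmpty then sections else sections ++ [(current_desc, current_section)]),
      [line], "Newborn Identification Functions")
  else if PySem.Str.isIn "def assign_claim_type" line then
    ((if current_section.isEmpty then sections else sections ++ [(current_desc, current_section)]),
      [line], "Claim Classification and Reference Tagging")
  else if PySem.Str.isIn "def build_hosp_rollup" line then
    ((if current_section.isEmpty then sections else sections ++ [(current_desc, current_section)]),
      [line], "Hospital Rollup and Episode Building")
  else if PySem.Str.isIn "def build_nicu_rollup" line then
    ((if current_section.isEmpty then sections else sections ++ [(current_desc, current_section)]),
      [line], "NICU Analysis and Rollup")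
  else if PySem.Str.isIn "def prepare_final_export" line then
    ((if current_section.isEmpty then sections else sections ++ [(current_desc, current_section)]),
      [line], "Final Export Preparation")
  else if PySem.Str.isIn "def main(" line then
    ((if current_section.isEmpty then sections else sections ++ [(current_desc, current_section)]),
      [line], "Main Pipeline Orchestration")
  else
    (sections, current_section ++ [line], current_desc)

def split_large_code_cell (source_lines : List String) : List (String × List String) :=
  match source_lines.foldl pvStepA ([], [], "Imports and Setup") with
  | (sections, current_section, current_desc) =>
    if current_section.isEmpty then sections else sections ++ [(current_desc, current_section)]

-- ===== PORT B =====
def pvMarkers : List (String × String) :=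
  [("def get_snowflake_session", "Connection Management Functions"),
   ("def calculate_birth_window", "Date Window Calculation"),
   ("def process_membership", "Membership Processing Functions"),
   ("def fetch_newborn_keys", "Newborn Identification Functions"),
   ("def assign_claim_type", "Claim Classification and Reference Tagging"),
   ("def build_hosp_rollup", "Hospital Rollup and Episode Building"),
   ("def build_nicu_rollup", "NICU Analysis and Rollup"),
   ("def prepare_final_export", "Final Export Preparation"),
   ("def main(", "Main Pipeline Orchestration")]

-- _marker_desc: first marker whose substring occurs in the line
def pvMarkerDesc (line : String) : Option String :=
  (pvMarkers.find? (fun p => PySem.Str.isIn p.1 line)).map (·.2)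

-- one step of Source B's `for line in reversed(source_lines)` loop; state = (sections_rev, buf_rev)
def pvStepRev (acc : List (String × List String) × List String) (line : String) :
    List (String × List String) × List String :=
  let (sections_rev, buf_rev) := acc
  match pvMarkerDesc line with
  | none => (sections_rev, buf_rev ++ [line])
  | some d => (sections_rev ++ [(d, line :: buf_rev.reverse)], [])

def split_large_code_cell_alt (source_lines : List String) : List (String × List String) :=
  match (source_lines.reverse).foldl pvStepRev ([], []) with
  | (sections_rev, buf_rev) =>
    (if buf_rev.isEmpty then sections_rev
     else sections_rev ++ [("Imports and Setup", buf_rev.reverse)]).reverse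

-- ===== PRECONDITION & SPEC =====
def Spec_split_large_code_cell (source_lines : List String) (out : List (String × List String)) : Prop := out = split_large_code_cell_alt source_lines
instance (source_lines : List String) (out : List (String × List String)) : Decidable (Spec_split_large_code_cell source_lines out) := by unfold Spec_split_large_code_cell; infer_instance

-- ===== CLAIM =====
def Claim_equal_split_large_code_cell : Prop := ∀ (source_lines : List String), Dom_split_large_code_cell source_lines → Spec_split_large_code_cell source_lines (split_large_code_cell source_lines)

-- ===== LEMMAS AND PROOFS =====

-- leading non-marker prefix of the lines
def pvP : List String → List String
  | [] => []
  | l :: ls => if (pvMarkerDesc l).isSome then [] else l :: pvP ls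

-- the marker-started sections of the lines
def pvS : List String → List (String × List String)
  | [] => []
  | l :: ls =>
    match pvMarkerDesc l with
    | some d => (d, l :: pvP ls) :: pvS ls
    | none => pvS ls

-- A's final flush of the running state
def pvFlush (t : List (String × List String) × List String × String) : List (String × List String) :=
  if t.2.1.isEmpty then t.1 else t.1 ++ [(t.2.2, t.2.1)]

-- A's ladder step, expressed through the first-match marker lookup
set_option maxHeartbeats 1000000 in
theorem pvStepA_md (s : List (String × List String)) (c : List String) (dsc line : String) :
    pvStepA (s, c, dsc) line =
      match pvMarkerDesc line with
      | some d => ((if c.isEmpty then s else s ++ [(dsc, c)]), [line], d)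
      | none => (s, c ++ [line], dsc) := by
  simp only [pvStepA, pvMarkerDesc, pvMarkers, List.find?]
  cases h1 : PySem.Str.isIn "def get_snowflake_session" line <;>
  cases h2 : PySem.Str.isIn "def calculate_birth_window" line <;>
  cases h3 : PySem.Str.isIn "def process_membership" line <;>
  cases h4 : PySem.Str.isIn "def fetch_newborn_keys" line <;>
  cases h5 : PySem.Str.isIn "def assign_claim_type" line <;>
  cases h6 : PySem.Str.isIn "def build_hosp_rollup" line <;>
  cases h7 : PySem.Str.isIn "def build_nicu_rollup" line <;>
  cases h8 : PySem.Str.isIn "def prepare_final_export" line <;>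
  cases h9 : PySem.Str.isIn "def main(" line <;>
  simp [*]

theorem pvStepA_none (s : List (String × List String)) (c : List String) (dsc line : String)
    (h : pvMarkerDesc line = none) : pvStepA (s, c, dsc) line = (s, c ++ [line], dsc) := by
  rw [pvStepA_md, h]

theorem pvStepA_some (s : List (String × List String)) (c : List String) (dsc line d : String)
    (h : pvMarkerDesc line = some d) :
    pvStepA (s, c, dsc) line = ((if c.isEmpty then s else s ++ [(dsc, c)]), [line], d) := by
  rw [pvStepA_md, h]

-- B's backward fold computes (sections of the suffix, leading prefix), each reversed
theorem pvFoldRev (ls : List String) :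
    ls.foldr (fun x y => pvStepRev y x) ([], []) = ((pvS ls).reverse, (pvP ls).reverse) := by
  induction ls with
  | nil => simp [pvS, pvP]
  | cons l ls ih =>
    rw [List.foldr_cons, ih]
    cases h : pvMarkerDesc l <;> simp [pvStepRev, pvS, pvP, h]

-- B in terms of pvP / pvS
theorem pvAlt_eq (ls : List String) :
    split_large_code_cell_alt ls =
      (if (pvP ls).isEmpty then [] else [("Imports and Setup", pvP ls)]) ++ pvS ls := by
  unfold split_large_code_cell_alt
  rw [List.foldl_reverse, pvFoldRev]
  by_cases h : pvP ls = [] <;> simp [h]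

-- A's fold, flushed, in terms of pvP / pvS (generalized over the running state)
theorem pvFoldA (ls : List String) :
    ∀ (s : List (String × List String)) (c : List String) (dsc : String),
      pvFlush (ls.foldl pvStepA (s, c, dsc)) =
      s ++ (if (c ++ pvP ls).isEmpty then [] else [(dsc, c ++ pvP ls)]) ++ pvS ls := by
  induction ls with
  | nil => intro s c dsc; by_cases h : c = [] <;> simp [pvP, pvS, pvFlush, h]
  | cons l ls ih =>
    intro s c dsc
    cases h : pvMarkerDesc l with
    | none =>
      rw [List.foldl_cons, pvStepA_none _ _ _ _ h, ih]
      simp [pvP, pvS, h]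
    | some d =>
      rw [List.foldl_cons, pvStepA_some _ _ _ _ _ h, ih]
      by_cases hc : c = [] <;> simp [pvP, pvS, h, hc]

-- A = pvFlush of its fold
theorem pvA_flush (ls : List String) :
    split_large_code_cell ls = pvFlush (ls.foldl pvStepA ([], [], "Imports and Setup")) := by
  unfold split_large_code_cell
  rcases ls.foldl pvStepA ([], [], "Imports and Setup") with ⟨s', c', d'⟩
  simp [pvFlush]

-- ===== VERDICT =====
theorem split_large_code_cell_spec : Claim_equal_split_large_code_cell := by
  intro source_lines _
  unfold Spec_split_large_code_cell
  rw [pvA_flush, pvFoldA, pvAlt_eq]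
  simp
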